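-- pv_equiv track=rewrite | github.com/Nenogzar/Academy_SoftUni | fundamentals_python/lectures/28-29_Text Processing/02_Text Processing - Exercise/Exercise/10_winning_ticket.py | get_max_in_a_row
-- ===== SOURCE A (Python) =====
-- def get_max_in_a_row(string, symbol):
--     next_, current = 0, 0
--     for x in range(len(string)):
--         if string[x] == symbol:
--             next_ += 1
--             if x == len(string) - 1:
--                 if current < next_:
--                     current = next_
--         else:
--             if current < next_:
--                 current = next_
--             next_ = 0
--     return current
-- ===== SOURCE B (Python) =====
-- def get_max_in_a_row(string, symbol):
--     # Run-length decomposition: collect the lengths of maximal runs of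
--     # identical characters that equal symbol, then take their maximum.
--     runs = []
--     rest = string
--     while rest:
--         c = rest[0]
--         k = 1
--         while k < len(rest) and rest[k] == c:
--             k += 1
--         if c == symbol:
--             runs.append(k)
--         rest = rest[k:]
--     return max(runs, default=0)
-- ===== Notes on version B (the rewrite author's own statement) =====
-- stated objective: alternative
-- what changed: Replaced the positional counter loop with its end-of-string special case by a run-length decomposition: scan maximal runs of identical characters, collect the lengths of the runs equal to symbol, and return their maximum with default 0.
import Mathlib
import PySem

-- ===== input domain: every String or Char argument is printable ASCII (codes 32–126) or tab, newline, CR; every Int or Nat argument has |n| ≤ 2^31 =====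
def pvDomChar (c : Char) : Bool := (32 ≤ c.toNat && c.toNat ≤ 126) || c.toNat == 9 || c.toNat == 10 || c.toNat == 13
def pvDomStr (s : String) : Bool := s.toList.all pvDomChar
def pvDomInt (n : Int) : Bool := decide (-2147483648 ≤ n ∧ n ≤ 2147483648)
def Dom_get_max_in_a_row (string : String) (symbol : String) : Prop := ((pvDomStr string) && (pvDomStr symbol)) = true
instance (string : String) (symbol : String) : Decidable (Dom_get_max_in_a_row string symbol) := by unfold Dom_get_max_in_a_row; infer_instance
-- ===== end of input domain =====

-- B replaces A's positional counter loop (with its end-of-string special case) by a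
-- run-length decomposition followed by a maximum with default 0 (alternative algorithm, not faster).

-- ===== PORT A =====
-- Python's string[x] is a 1-char string compared to symbol; exact as [c] = symbol.toList.
def get_max_in_a_row (string : String) (symbol : String) : Int :=
  let s := string.toList
  let n : Int := (s.length : Int)
  let st := (PySem.List.pyRange 0 n 1).foldl (fun (st : Int × Int) x =>
    if [PySem.List.pyGetD s x 'a'] = symbol.toList then
      (st.1 + 1, if x = n - 1 then (if st.2 < st.1 + 1 then st.1 + 1 else st.2) else st.2)
    else
      (0, if st.2 < st.1 then st.1 else st.2)) (0, 0)
  st.2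

-- ===== PORT B =====
-- The outer while loop of Source B: one recursive step per maximal run of identical chars.
def pvRunsB (symbol : List Char) : List Char → List Int
  | [] => []
  | c :: rest =>
      let k : Int := 1 + (rest.takeWhile (· == c)).length
      let tail := rest.dropWhile (· == c)
      (if [c] = symbol then [k] else []) ++ pvRunsB symbol tail
  termination_by l => l.length
  decreasing_by simpa using Nat.lt_succ_of_le (List.length_dropWhile_le _ _)

def get_max_in_a_row_alt (string : String) (symbol : String) : Int :=
  let runs := pvRunsB symbol.toList string.toList
  (PySem.List.max? runs (fun y => y)).getD 0

-- ===== PRECONDITION & SPEC =====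
def Spec_get_max_in_a_row (string : String) (symbol : String) (out : Int) : Prop := out = get_max_in_a_row_alt string symbol
instance (string : String) (symbol : String) (out : Int) : Decidable (Spec_get_max_in_a_row string symbol out) := by unfold Spec_get_max_in_a_row; infer_instance

-- ===== CLAIM (what is proved, stated in full; the proofs are below) =====
def Claim_equal_get_max_in_a_row : Prop := ∀ (string : String) (symbol : String), Dom_get_max_in_a_row string symbol → Spec_get_max_in_a_row string symbol (get_max_in_a_row string symbol)

-- ===== LEMMAS AND PROOFS =====

-- Structural version of A's loop (rest = [] replaces the x = n-1 test).
def pvALoop (sym : List Char) : List Char → Int × Int → Int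
  | [], st => st.2
  | c :: rest, st =>
      if [c] = sym then
        let next' := st.1 + 1
        pvALoop sym rest (next', if rest = [] then (if st.2 < next' then next' else st.2) else st.2)
      else
        pvALoop sym rest (0, if st.2 < st.1 then st.1 else st.2)


lemma pv_bridge (sym : List Char) (s : List Char) : ∀ (suf pre : List Char) (st : Int × Int), s = pre ++ suf →
    ((PySem.List.pyRange (pre.length : Int) (s.length : Int) 1).foldl (fun (st : Int × Int) x =>
      if [PySem.List.pyGetD s x 'a'] = sym then
        (st.1 + 1, if x = (s.length : Int) - 1 then (if st.2 < st.1 + 1 then st.1 + 1 else st.2) else st.2)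
      else
        (0, if st.2 < st.1 then st.1 else st.2)) st).2 = pvALoop sym suf st := by
  intro suf
  induction suf with
  | nil =>
    intro pre st h
    rw [PySem.List.pyRange_one_eq_nil (by simp [h])]
    rfl
  | cons c rest ih =>
    intro pre st h
    have hlt : (pre.length : Int) < (s.length : Int) := by simp [h]
    rw [PySem.List.pyRange_one_cons hlt, List.foldl_cons]
    have hget : PySem.List.pyGetD s (pre.length : Int) 'a' = c := by
      simp [h, PySem.List.pyGetD_natCast, List.getD]
    have hlast : ((pre.length : Int) = (s.length : Int) - 1) ↔ rest = [] := by
      subst h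
      constructor
      · intro he
        have : rest.length = 0 := by simp at he; omega
        exact List.eq_nil_of_length_eq_zero this
      · intro he; subst he; simp
    have hnext : ((pre.length : Int) + 1) = (((pre ++ [c]).length : Int)) := by simp
    rw [hget, hnext]
    rw [ih (pre ++ [c]) _ (by simp [h])]
    by_cases hm : [c] = sym
    · by_cases hr : rest = []
      · simp [pvALoop, hm, hr, hlast.mpr hr]
      · have : ¬ ((pre.length : Int) = (s.length : Int) - 1) := fun hx => hr (hlast.mp hx)
        simp [pvALoop, hm, hr, this]
    · simp [pvALoop, hm]

lemma pv_if_max (a b : Int) : (if a < b then b else a) = max a b := by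
  split <;> omega

lemma pv_nonmatch_run (sym : List Char) (c : Char) (hc : ¬ [c] = sym) :
    ∀ (j : ℕ) (tail : List Char) (next current : Int), 1 ≤ j → 0 ≤ next → 0 ≤ current →
    pvALoop sym (List.replicate j c ++ tail) (next, current) = pvALoop sym tail (0, max current next) := by
  intro j
  induction j with
  | zero => omega
  | succ j ih =>
    intro tail next current _ hn hcur
    rw [List.replicate_succ, List.cons_append]
    simp only [pvALoop, hc, if_false, pv_if_max]
    by_cases hj : j = 0
    · subst hj; simp
    · rw [ih tail 0 (max current next) (by omega) le_rfl (by omega)]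
      congr 2
      exact max_eq_left (le_max_of_le_left hcur)

lemma pv_match_run (sym : List Char) (c : Char) (hc : [c] = sym) :
    ∀ (j : ℕ) (tail : List Char) (next current : Int), 1 ≤ j → 0 ≤ next → 0 ≤ current →
    tail.head? ≠ some c →
    pvALoop sym (List.replicate j c ++ tail) (next, current) =
      pvALoop sym tail (0, max current (next + j)) := by
  intro j
  induction j with
  | zero => omega
  | succ j ih =>
    intro tail next current _ hn hcur htail
    rw [List.replicate_succ, List.cons_append]
    by_cases hj : j = 0
    · subst hj
      simp only [List.replicate_zero, List.nil_append]
      cases tail with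
      | nil =>
        simp only [pvALoop, hc, if_true]
        push_cast
        split <;> omega
      | cons c' t' =>
        have hc' : ¬ [c'] = sym := by
          intro h
          rw [← hc] at h
          simp only [List.cons.injEq, and_true] at h
          exact htail (by simp [h])
        simp only [pvALoop, hc, if_true, reduceCtorEq, if_false, hc', pv_if_max]
        congr 2
        push_cast
        omega
    · have hne : ¬ (List.replicate j c ++ tail = []) := by
        simp [List.replicate_eq_nil_iff, hj]
      simp only [pvALoop, hc, if_true, hne, if_false]
      rw [ih tail (next + 1) current (by omega) (by omega) hcur htail]
      congr 2
      push_cast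
      omega

lemma pv_head_dropWhile (c : Char) : ∀ (rest : List Char), (rest.dropWhile (· == c)).head? ≠ some c := by
  intro rest
  induction rest with
  | nil => simp
  | cons a t ih =>
    by_cases h : (a == c) = true
    · simpa [List.dropWhile_cons, h] using ih
    · simp only [List.dropWhile_cons, h]
      simp only [Bool.false_eq_true, if_false, List.head?_cons, ne_eq, Option.some.injEq]
      intro he
      exact h (by simp [he])

lemma pv_run_split (c : Char) (rest : List Char) :
    c :: rest = List.replicate ((rest.takeWhile (· == c)).length + 1) c ++ rest.dropWhile (· == c) := by
  have hrep : rest.takeWhile (· == c) = List.replicate (rest.takeWhile (· == c)).length c := by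
    apply List.eq_replicate_of_mem
    intro b hb
    have := List.mem_takeWhile_imp hb
    simpa using this
  calc c :: rest = c :: (rest.takeWhile (· == c) ++ rest.dropWhile (· == c)) := by
        rw [List.takeWhile_append_dropWhile]
    _ = (c :: List.replicate (rest.takeWhile (· == c)).length c) ++ rest.dropWhile (· == c) := by
        rw [← hrep]; rfl
    _ = _ := by rw [← List.replicate_succ]

lemma pvRunsB_cons (sym : List Char) (c : Char) (rest : List Char) :
    pvRunsB sym (c :: rest) =
      (if [c] = sym then [(1 + ((rest.takeWhile (· == c)).length : Int))] else []) ++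
        pvRunsB sym (rest.dropWhile (· == c)) := by
  rw [pvRunsB]

lemma pvRunsB_pos (sym : List Char) (s : List Char) : ∀ x ∈ pvRunsB sym s, 1 ≤ x := by
  induction s using pvRunsB.induct with
  | case1 => intro x hx; rw [pvRunsB] at hx; simp at hx
  | case2 c rest tail ih =>
    intro x hx
    rw [pvRunsB_cons] at hx
    rcases List.mem_append.mp hx with h1 | h2
    · split at h1
      · simp at h1; subst h1; omega
      · simp at h1
    · exact ih x h2

lemma pv_main (sym : List Char) (s : List Char) : ∀ (current : Int), 0 ≤ current →
    pvALoop sym s (0, current) = (pvRunsB sym s).foldl max current := by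
  induction s using pvRunsB.induct with
  | case1 => intro current _; rw [pvRunsB]; rfl
  | case2 c rest tail ih =>
    intro current hcur
    have hhead := pv_head_dropWhile c rest
    rw [pvRunsB_cons]
    by_cases hm : [c] = sym
    · conv_lhs => rw [pv_run_split c rest]
      rw [pv_match_run sym c hm _ _ 0 current (by omega) le_rfl hcur hhead]
      simp only [hm, if_true, List.singleton_append, List.foldl_cons]
      rw [ih _ (le_max_of_le_left hcur)]
      congr 1
      push_cast
      omega
    · conv_lhs => rw [pv_run_split c rest]
      rw [pv_nonmatch_run sym c hm _ _ 0 current (by omega) le_rfl hcur]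
      simp only [hm, if_false, List.nil_append]
      rw [max_eq_left hcur]
      exact ih current hcur

lemma pv_max_foldl (rs : List Int) (h : ∀ x ∈ rs, 1 ≤ x) :
    rs.foldl max 0 = (PySem.List.max? rs (fun y => y)).getD 0 := by
  cases rs with
  | nil => rfl
  | cons x t =>
    rw [PySem.List.max?_id_cons]
    simp only [Option.getD_some, List.foldl_cons]
    congr 1
    have : (1:Int) ≤ x := h x (by simp)
    omega

-- ===== VERDICT (by name: the statement is the Claim_ definition above) =====
theorem get_max_in_a_row_spec : Claim_equal_get_max_in_a_row := by
  intro string symbol _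
  unfold Spec_get_max_in_a_row get_max_in_a_row get_max_in_a_row_alt
  have hb := pv_bridge symbol.toList string.toList string.toList [] (0, 0) rfl
  simp only [List.length_nil, Nat.cast_zero] at hb
  rw [hb, pv_main symbol.toList string.toList 0 le_rfl,
      pv_max_foldl _ (pvRunsB_pos _ _)]
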